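-- pv_equiv track=rewrite | github.com/sanjay2005d/Snake-Game-AI | snake AI/pathfinding.py | dfs
-- ===== SOURCE A (Python) =====
-- def neighbors(node):
--     x, y = node
--     return [(x+1, y), (x-1, y), (x, y+1), (x, y-1)]
--
-- def in_bounds(n, cols, rows):
--     x, y = n
--     return 0 <= x < cols and 0 <= y < rows
--
-- def reconstruct(parent, goal):
--     path = []
--     cur = goal
--     while cur is not None:
--         path.append(cur)
--         cur = parent[cur]
--     path.reverse()
--     return path
--
-- def heuristic(a, b):
--     return abs(a[0]-b[0]) + abs(a[1]-b[1])
--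
-- def dfs(start, goal, blocked, cols, rows):
--     stack  = [start]
--     parent = {start: None}
--
--     while stack:
--         current = stack.pop()
--         if current == goal:
--             return reconstruct(parent, goal)
--
--         nbs = []
--         for n in neighbors(current):
--             if not in_bounds(n, cols, rows): continue
--             if n in blocked:                 continue
--             if n in parent:                  continue
--             dist = heuristic(n, goal)
--             nbs.append((dist, n))
--
--         # push farthest first → closest gets popped first
--         nbs.sort(reverse=True)
--         for _, n in nbs:
--             parent[n] = current
--             stack.append(n)
--     return []
-- ===== SOURCE B (Python) =====
-- def neighbors(node):
--     x, y = node
--     return [(x+1, y), (x-1, y), (x, y+1), (x, y-1)]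
--
-- def in_bounds(n, cols, rows):
--     x, y = n
--     return 0 <= x < cols and 0 <= y < rows
--
-- def reconstruct(parent, goal):
--     path = []
--     cur = goal
--     while cur is not None:
--         path.append(cur)
--         cur = parent[cur]
--     path.reverse()
--     return path
--
-- def heuristic(a, b):
--     return abs(a[0]-b[0]) + abs(a[1]-b[1])
--
-- def dfs(start, goal, blocked, cols, rows):
--     # backtracking search: keep the current path explicitly and return it when the
--     # goal is discovered -- no parent pointers and no path reconstruction needed
--     if start == goal:
--         return [start]
--     visited = {start}
--
--     def children(cur):
--         nbs = [n for n in neighbors(cur)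
--                if in_bounds(n, cols, rows) and n not in blocked and n not in visited]
--         nbs.sort(key=lambda n: (heuristic(n, goal), n))
--         visited.update(nbs)          # mark every discovered child at discovery time
--         return nbs                   # closest to the goal first
--
--     path = [start]
--     pending = [children(start)]      # pending[i]: untried children of path[i]
--     while pending:
--         todo = pending[-1]
--         if not todo:                 # subtree exhausted: backtrack
--             pending.pop()
--             path.pop()
--             continue
--         n = todo.pop(0)
--         if n == goal:
--             return path + [n]
--         path.append(n)
--         pending.append(children(n))
--     return []
-- ===== Notes on version B (the rewrite author's own statement) =====
-- stated objective: alternative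
-- what changed: A's frontier stack + parent-pointer dict + path reconstruction is replaced by explicit backtracking that maintains the current path and per-level pending-children lists over a plain visited set, returning the path directly when the goal is discovered
import Mathlib
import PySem

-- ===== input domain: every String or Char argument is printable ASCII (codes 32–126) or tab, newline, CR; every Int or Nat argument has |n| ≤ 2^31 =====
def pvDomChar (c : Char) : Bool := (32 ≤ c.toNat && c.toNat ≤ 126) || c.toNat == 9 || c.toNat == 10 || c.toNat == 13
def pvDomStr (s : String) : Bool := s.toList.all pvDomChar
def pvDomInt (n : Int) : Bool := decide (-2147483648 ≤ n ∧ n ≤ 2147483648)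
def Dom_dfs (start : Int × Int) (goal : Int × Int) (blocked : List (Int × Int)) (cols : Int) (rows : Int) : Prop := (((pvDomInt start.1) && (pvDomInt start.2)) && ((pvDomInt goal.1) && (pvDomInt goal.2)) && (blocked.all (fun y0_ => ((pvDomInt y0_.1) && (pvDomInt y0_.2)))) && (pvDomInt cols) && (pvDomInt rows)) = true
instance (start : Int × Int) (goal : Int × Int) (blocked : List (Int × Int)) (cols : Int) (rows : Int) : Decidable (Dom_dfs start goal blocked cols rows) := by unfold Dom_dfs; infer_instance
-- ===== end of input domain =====

-- B replaces A's frontier stack + parent-pointer dict + path reconstruction by explicit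
-- backtracking that maintains the current path and per-level pending-children lists over
-- a plain visited set, returning the path directly; objective: alternative decomposition.

-- ===== SHARED MODULE HELPERS (neighbors / in_bounds / heuristic are module-level
-- helpers used verbatim by both Source A and Source B; reconstruct is used by Source A only) =====
def pvNeighbors (c : Int × Int) : List (Int × Int) :=
  [(c.1 + 1, c.2), (c.1 - 1, c.2), (c.1, c.2 + 1), (c.1, c.2 - 1)]

def pvInBounds (n : Int × Int) (cols rows : Int) : Bool :=
  decide (0 ≤ n.1 ∧ n.1 < cols ∧ 0 ≤ n.2 ∧ n.2 < rows)

def pvHeur (a b : Int × Int) : Int := |a.1 - b.1| + |a.2 - b.2|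

-- ===== PORT A =====
-- reconstruct's while loop; fuel p.size + 1 covers the parent chain (each chain key was
-- inserted strictly after its value, so the chain is acyclic and shorter than the dict).
-- Exact for the dicts this algorithm builds: the chain key is always present, so Python's
-- parent[cur] never raises (a missing key is read as None here, which that loop never hits).
def pvReconGo (p : PySem.Dict (Int × Int) (Option (Int × Int))) :
    Nat → Option (Int × Int) → List (Int × Int) → List (Int × Int)
  | 0, _, path => path.reverse
  | _ + 1, none, path => path.reverse
  | f + 1, some c, path => pvReconGo p f ((p.get? c).getD none) (path ++ [c])

def pvReconstruct (p : PySem.Dict (Int × Int) (Option (Int × Int))) (goal : Int × Int) :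
    List (Int × Int) := pvReconGo p (p.size + 1) (some goal) []

-- nbs.sort(reverse=True) on (int, (int, int)) tuples in Source A, ported by hand
-- (PySem.List.sorted needs an LT key; nested tuples compare lexicographically in Python,
-- which is not Mathlib's Prod order): stable insertion sort with the exact lexicographic
-- tuple comparison (an element is inserted before the equal ones already in place).
def pvLexLt (a b : Int × (Int × Int)) : Bool :=
  a.1 < b.1 || (a.1 == b.1 && (a.2.1 < b.2.1 || (a.2.1 == b.2.1 && a.2.2 < b.2.2)))

def pvInsDesc (x : Int × (Int × Int)) : List (Int × (Int × Int)) → List (Int × (Int × Int))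
  | [] => [x]
  | y :: ys => if pvLexLt x y then y :: pvInsDesc x ys else x :: y :: ys

def pvSortDesc : List (Int × (Int × Int)) → List (Int × (Int × Int))
  | [] => []
  | x :: xs => pvInsDesc x (pvSortDesc xs)

-- the candidate list built by Source A's for-loop with continues: [(heuristic(n, goal), n)
-- for the in-bounds, unblocked, unvisited neighbours]
def pvRawCand (goal : Int × Int) (blocked : List (Int × Int)) (cols rows : Int)
    (p : PySem.Dict (Int × Int) (Option (Int × Int))) (current : Int × Int) :
    List (Int × (Int × Int)) :=
  ((pvNeighbors current).filter
      (fun n => pvInBounds n cols rows && !(blocked.contains n) && !(p.contains n))).map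
    (fun n => (pvHeur n goal, n))

-- fuel: A's loop pops at most 1 + cols*rows times, since every push after the first
-- marks a fresh in-bounds cell; this fuel is never exhausted.
def pvFuel (cols rows : Int) : Nat := cols.toNat * rows.toNat + 2

-- the while-stack loop of Source A's dfs; stack top is the list head (append+pop at the end)
def pvLoopA (goal : Int × Int) (blocked : List (Int × Int)) (cols rows : Int) :
    Nat → List (Int × Int) → PySem.Dict (Int × Int) (Option (Int × Int)) → List (Int × Int)
  | 0, _, _ => []
  | f + 1, stack, p =>
    match stack with
    | [] => []
    | current :: rest =>
      if current = goal then pvReconstruct p goal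
      else
        let nbs := pvSortDesc (pvRawCand goal blocked cols rows p current)
        -- for _, n in nbs: parent[n] = current; stack.append(n)
        let st := nbs.foldl (fun (acc : _ × List (Int × Int)) q =>
          (acc.1.insert q.2 (some current), q.2 :: acc.2)) (p, rest)
        pvLoopA goal blocked cols rows f st.2 st.1

def dfs (start : Int × Int) (goal : Int × Int) (blocked : List (Int × Int)) (cols : Int) (rows : Int) : List (Int × Int) :=
  pvLoopA goal blocked cols rows (pvFuel cols rows) [start] (PySem.Dict.ofList [(start, none)])

-- ===== PORT B =====
-- nbs.sort(key=lambda n: (heuristic(n, goal), n)) in Source B: the same hand-ported stable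
-- insertion sort, comparing the key tuples with the exact lexicographic comparison.
def pvInsNode (goal : Int × Int) (x : Int × Int) : List (Int × Int) → List (Int × Int)
  | [] => [x]
  | y :: ys =>
    if pvLexLt (pvHeur y goal, y) (pvHeur x goal, x) then y :: pvInsNode goal x ys
    else x :: y :: ys

def pvSortNodes (goal : Int × Int) : List (Int × Int) → List (Int × Int)
  | [] => []
  | x :: xs => pvInsNode goal x (pvSortNodes goal xs)

-- Source B's children(cur): filter the fresh valid neighbours, sort them closest-first,
-- mark them all in the visited set; returns (nbs, the updated visited set)
def pvChildren (goal : Int × Int) (blocked : List (Int × Int)) (cols rows : Int)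
    (vis : PySem.Set (Int × Int)) (cur : Int × Int) :
    List (Int × Int) × PySem.Set (Int × Int) :=
  let nbs := pvSortNodes goal ((pvNeighbors cur).filter
      (fun n => pvInBounds n cols rows && !(blocked.contains n)
        && !(PySem.Set.contains vis n)))
  (nbs, PySem.Set.update vis nbs)

-- fuel: every iteration of Source B's while loop either consumes a pending node (each node
-- is discovered and queued at most once: at most cols*rows + 1 of those) or pops one of
-- the at most as many pending lists ever created; this fuel is never exhausted.
def pvFuelB (cols rows : Int) : Nat := 3 * (cols.toNat * rows.toNat) + 12

-- Source B's while loop; the stack top pending[-1] is the list head (append+pop at the end),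
-- a pending list's front todo[0] is its head (pop(0) at the front)
def pvLoopB (goal : Int × Int) (blocked : List (Int × Int)) (cols rows : Int) :
    Nat → List (List (Int × Int)) → List (Int × Int) → PySem.Set (Int × Int) →
      List (Int × Int)
  | 0, _, _, _ => []
  | f + 1, frames, path, vis =>
    match frames with
    | [] => []
    | todo :: rest =>
      match todo with
      | [] => pvLoopB goal blocked cols rows f rest path.dropLast vis
      | n :: todoRest =>
        if n = goal then path ++ [n]
        else
          let c := pvChildren goal blocked cols rows vis n
          pvLoopB goal blocked cols rows f (c.1 :: todoRest :: rest) (path ++ [n]) c.2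

def dfs_alt (start : Int × Int) (goal : Int × Int) (blocked : List (Int × Int)) (cols : Int) (rows : Int) : List (Int × Int) :=
  if start = goal then [start]
  else
    let c0 := pvChildren goal blocked cols rows (PySem.Set.ofList [start]) start
    pvLoopB goal blocked cols rows (pvFuelB cols rows) [c0.1] [start] c0.2

-- ===== PRECONDITION & SPEC =====
def Spec_dfs (start : Int × Int) (goal : Int × Int) (blocked : List (Int × Int)) (cols : Int) (rows : Int) (out : List (Int × Int)) : Prop := out = dfs_alt start goal blocked cols rows
instance (start : Int × Int) (goal : Int × Int) (blocked : List (Int × Int)) (cols : Int) (rows : Int) (out : List (Int × Int)) : Decidable (Spec_dfs start goal blocked cols rows out) := by unfold Spec_dfs; infer_instance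

-- ===== CLAIM (what is proved, stated in full; the proofs are below) =====
def Claim_equal_dfs : Prop := ∀ (start : Int × Int) (goal : Int × Int) (blocked : List (Int × Int)) (cols : Int) (rows : Int), Dom_dfs start goal blocked cols rows → Spec_dfs start goal blocked cols rows (dfs start goal blocked cols rows)

-- ===== LEMMAS AND PROOFS =====

-- ---------- lexicographic comparison facts ----------
def pvLexLe (a b : Int × (Int × Int)) : Prop := pvLexLt b a = false

-- sorted(...) ascending: proof-side mirror of pvSortDesc, used to name the order in
-- which A's descending pushes are popped again
def pvInsAsc (x : Int × (Int × Int)) : List (Int × (Int × Int)) → List (Int × (Int × Int))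
  | [] => [x]
  | y :: ys => if pvLexLt y x then y :: pvInsAsc x ys else x :: y :: ys

def pvSortAsc : List (Int × (Int × Int)) → List (Int × (Int × Int))
  | [] => []
  | x :: xs => pvInsAsc x (pvSortAsc xs)

theorem pv_lexLt_asymm {a b : Int × (Int × Int)} (h : pvLexLt a b = true) :
    pvLexLt b a = false := by
  obtain ⟨a1, a2, a3⟩ := a; obtain ⟨b1, b2, b3⟩ := b
  simp [pvLexLt] at h ⊢; omega

theorem pv_lexLt_total {a b : Int × (Int × Int)} (h1 : pvLexLt a b = false)
    (h2 : pvLexLt b a = false) : a = b := by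
  obtain ⟨a1, a2, a3⟩ := a; obtain ⟨b1, b2, b3⟩ := b
  simp [pvLexLt] at h1 h2 ⊢
  omega

theorem pv_lexLe_trans {a b c : Int × (Int × Int)} (h1 : pvLexLt b a = false)
    (h2 : pvLexLt c b = false) : pvLexLt c a = false := by
  obtain ⟨a1, a2, a3⟩ := a; obtain ⟨b1, b2, b3⟩ := b; obtain ⟨c1, c2, c3⟩ := c
  simp [pvLexLt] at h1 h2 ⊢; omega

theorem pv_insDesc_perm (x : Int × (Int × Int)) (l : List (Int × (Int × Int))) :
    (pvInsDesc x l).Perm (x :: l) := by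
  induction l with
  | nil => simp [pvInsDesc]
  | cons y ys ih =>
    simp only [pvInsDesc]
    split
    · exact ((ih.cons y).trans (List.Perm.swap x y ys))
    · exact List.Perm.refl _

theorem pv_sortDesc_perm (l : List (Int × (Int × Int))) : (pvSortDesc l).Perm l := by
  induction l with
  | nil => simp [pvSortDesc]
  | cons x xs ih => exact (pv_insDesc_perm x (pvSortDesc xs)).trans (ih.cons x)

theorem pv_insAsc_perm (x : Int × (Int × Int)) (l : List (Int × (Int × Int))) :
    (pvInsAsc x l).Perm (x :: l) := by
  induction l with
  | nil => simp [pvInsAsc]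
  | cons y ys ih =>
    simp only [pvInsAsc]
    split
    · exact ((ih.cons y).trans (List.Perm.swap x y ys))
    · exact List.Perm.refl _

theorem pv_sortAsc_perm (l : List (Int × (Int × Int))) : (pvSortAsc l).Perm l := by
  induction l with
  | nil => simp [pvSortAsc]
  | cons x xs ih => exact (pv_insAsc_perm x (pvSortAsc xs)).trans (ih.cons x)

theorem pv_insAsc_pairwise {x : Int × (Int × Int)} {l : List (Int × (Int × Int))}
    (h : l.Pairwise pvLexLe) : (pvInsAsc x l).Pairwise pvLexLe := by
  induction l with
  | nil => simp [pvInsAsc, pvLexLe]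
  | cons y ys ih =>
    rcases List.pairwise_cons.mp h with ⟨hy, hys⟩
    simp only [pvInsAsc]
    split
    · rename_i h'
      refine List.pairwise_cons.mpr ⟨?_, ih hys⟩
      intro z hz
      rcases List.mem_cons.mp ((pv_insAsc_perm x ys).mem_iff.mp hz) with hz' | hz'
      · subst hz'; exact pv_lexLt_asymm h'
      · exact hy z hz'
    · rename_i h'
      have h'' : pvLexLt y x = false := by
        cases hb : pvLexLt y x with
        | false => rfl
        | true => exact absurd hb h'
      refine List.pairwise_cons.mpr ⟨?_, List.pairwise_cons.mpr ⟨hy, hys⟩⟩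
      intro z hz
      rcases List.mem_cons.mp hz with hz' | hz'
      · subst hz'; exact h''
      · exact pv_lexLe_trans h'' (hy z hz')

theorem pv_sortAsc_pairwise (l : List (Int × (Int × Int))) :
    (pvSortAsc l).Pairwise pvLexLe := by
  induction l with
  | nil => simp [pvSortAsc]
  | cons x xs ih => exact pv_insAsc_pairwise ih

theorem pv_insDesc_pairwise {x : Int × (Int × Int)} {l : List (Int × (Int × Int))}
    (h : l.Pairwise (fun a b => pvLexLe b a)) :
    (pvInsDesc x l).Pairwise (fun a b => pvLexLe b a) := by
  induction l with
  | nil => simp [pvInsDesc, pvLexLe]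
  | cons y ys ih =>
    rcases List.pairwise_cons.mp h with ⟨hy, hys⟩
    simp only [pvInsDesc]
    split
    · rename_i h'
      refine List.pairwise_cons.mpr ⟨?_, ih hys⟩
      intro z hz
      rcases List.mem_cons.mp ((pv_insDesc_perm x ys).mem_iff.mp hz) with hz' | hz'
      · subst hz'; exact pv_lexLt_asymm h'
      · exact hy z hz'
    · rename_i h'
      have h'' : pvLexLt x y = false := by
        cases hb : pvLexLt x y with
        | false => rfl
        | true => exact absurd hb h'
      refine List.pairwise_cons.mpr ⟨?_, List.pairwise_cons.mpr ⟨hy, hys⟩⟩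
      intro z hz
      rcases List.mem_cons.mp hz with hz' | hz'
      · subst hz'; exact h''
      · exact pv_lexLe_trans (hy z hz') h''

theorem pv_sortDesc_pairwise (l : List (Int × (Int × Int))) :
    (pvSortDesc l).Pairwise (fun a b => pvLexLe b a) := by
  induction l with
  | nil => simp [pvSortDesc]
  | cons x xs ih => exact pv_insDesc_pairwise ih

theorem pv_sortAsc_eq_reverse (l : List (Int × (Int × Int))) :
    pvSortAsc l = (pvSortDesc l).reverse := by
  refine List.Perm.eq_of_pairwise (le := pvLexLe)
    (fun a b _ _ h1 h2 => pv_lexLt_total h2 h1)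
    (pv_sortAsc_pairwise l)
    (List.pairwise_reverse.mpr (pv_sortDesc_pairwise l))
    ((pv_sortAsc_perm l).trans
      ((pv_sortDesc_perm l).symm.trans (List.reverse_perm _).symm))

-- ---------- the node sort of Source B is the pair sort of Source A, read off the nodes ----------
theorem pv_insNode_map (goal : Int × Int) (x : Int × Int) (l : List (Int × Int)) :
    (pvInsNode goal x l).map (fun n => (pvHeur n goal, n))
      = pvInsAsc (pvHeur x goal, x) (l.map (fun n => (pvHeur n goal, n))) := by
  induction l with
  | nil => rfl
  | cons y ys ih =>
    by_cases h : pvLexLt (pvHeur y goal, y) (pvHeur x goal, x) = true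
    · simp [pvInsNode, pvInsAsc, h, ih]
    · simp [pvInsNode, pvInsAsc, h]

theorem pv_sortNodes_map (goal : Int × Int) (l : List (Int × Int)) :
    (pvSortNodes goal l).map (fun n => (pvHeur n goal, n))
      = pvSortAsc (l.map (fun n => (pvHeur n goal, n))) := by
  induction l with
  | nil => rfl
  | cons x xs ih => simp [pvSortNodes, pvSortAsc, pv_insNode_map, ih]

theorem pv_sortNodes_eq (goal : Int × Int) (l : List (Int × Int)) :
    pvSortNodes goal l
      = (pvSortAsc (l.map (fun n => (pvHeur n goal, n)))).map (·.2) := by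
  rw [← pv_sortNodes_map, List.map_map]
  simp [Function.comp_def]

-- ---------- the in-bounds cells and the termination measure ----------
def pvCellsL (cols rows : Int) : List (Int × Int) :=
  (List.range cols.toNat).flatMap (fun i => (List.range rows.toNat).map
    (fun j => ((i : Int), (j : Int))))

def pvCells (cols rows : Int) : Finset (Int × Int) := (pvCellsL cols rows).toFinset

def pvMu (cols rows : Int) (p : PySem.Dict (Int × Int) (Option (Int × Int))) : Nat :=
  ((pvCells cols rows).filter (fun c => p.contains c = false)).card

theorem pv_mem_cellsL {cols rows : Int} {n : Int × Int} :
    n ∈ pvCellsL cols rows ↔ pvInBounds n cols rows = true := by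
  rw [show (pvInBounds n cols rows = true) ↔
      (0 ≤ n.1 ∧ n.1 < cols ∧ 0 ≤ n.2 ∧ n.2 < rows) by
    simp [pvInBounds]]
  simp only [pvCellsL, List.mem_flatMap, List.mem_map]
  constructor
  · rintro ⟨i, hi, j, hj, rfl⟩
    simp at hi hj
    obtain ⟨a, ha, rfl⟩ := hi
    obtain ⟨b, hb, rfl⟩ := hj
    dsimp only
    refine ⟨by omega, by omega, by omega, by omega⟩
  · rintro ⟨h1, h2, h3, h4⟩
    refine ⟨n.1, ?_, n.2, ?_, Prod.mk.eta⟩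
    · simp only [List.pure_def, List.bind_eq_flatMap, List.mem_flatMap, List.mem_range,
        List.mem_singleton]
      exact ⟨n.1.toNat, by omega, by omega⟩
    · simp only [List.pure_def, List.bind_eq_flatMap, List.mem_flatMap, List.mem_range,
        List.mem_singleton]
      exact ⟨n.2.toNat, by omega, by omega⟩

theorem pv_mem_cells {cols rows : Int} {n : Int × Int} :
    n ∈ pvCells cols rows ↔ pvInBounds n cols rows = true := by
  rw [pvCells, List.mem_toFinset]; exact pv_mem_cellsL

theorem pv_mu_le (cols rows : Int) (p : PySem.Dict (Int × Int) (Option (Int × Int))) :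
    pvMu cols rows p ≤ cols.toNat * rows.toNat := by
  have h1 : pvMu cols rows p ≤ (pvCells cols rows).card :=
    Finset.card_filter_le _ _
  have h2 : (pvCells cols rows).card ≤ (pvCellsL cols rows).length :=
    List.toFinset_card_le _
  have h3 : (pvCellsL cols rows).length = cols.toNat * rows.toNat := by
    simp [pvCellsL, List.length_flatMap]
  omega

theorem pv_mu_insert {cols rows : Int} {p : PySem.Dict (Int × Int) (Option (Int × Int))}
    {k : Int × Int} (v : Option (Int × Int)) (hk : k ∈ pvCells cols rows)
    (hc : p.contains k = false) :
    pvMu cols rows (p.insert k v) + 1 = pvMu cols rows p := by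
  have hfe : (pvCells cols rows).filter (fun c => (p.insert k v).contains c = false)
      = ((pvCells cols rows).filter (fun c => p.contains c = false)).erase k := by
    ext c
    simp only [Finset.mem_filter, Finset.mem_erase, PySem.Dict.contains_insert,
      Bool.or_eq_false_iff, beq_eq_false_iff_ne, ne_eq]
    tauto
  have hmem : k ∈ (pvCells cols rows).filter (fun c => p.contains c = false) := by
    simp [Finset.mem_filter, hk, hc]
  have hcard := Finset.card_erase_of_mem hmem
  have hpos : 0 < ((pvCells cols rows).filter (fun c => p.contains c = false)).card :=
    Finset.card_pos.mpr ⟨k, hmem⟩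
  unfold pvMu
  rw [hfe, hcard]
  omega

theorem pv_mu_fold {cols rows : Int} (cur : Int × Int) :
    ∀ (l : List (Int × (Int × Int))) (p : PySem.Dict (Int × Int) (Option (Int × Int))),
    (l.map (·.2)).Nodup →
    (∀ q ∈ l, q.2 ∈ pvCells cols rows ∧ p.contains q.2 = false) →
    pvMu cols rows (l.foldl (fun d q => d.insert q.2 (some cur)) p) + l.length
      = pvMu cols rows p := by
  intro l
  induction l with
  | nil => intro p _ _; simp
  | cons q qs ih =>
    intro p hnd hall
    simp only [List.map_cons, List.nodup_cons] at hnd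
    have hq := hall q (by simp)
    have step : ∀ q' ∈ qs, q'.2 ∈ pvCells cols rows ∧
        (p.insert q.2 (some cur)).contains q'.2 = false := by
      intro q' hq'
      have h1 := hall q' (by simp [hq'])
      refine ⟨h1.1, ?_⟩
      rw [PySem.Dict.contains_insert]
      have hne : q'.2 ≠ q.2 := by
        intro he
        exact hnd.1 (he ▸ List.mem_map_of_mem hq')
      simp [hne, h1.2]
    have := ih (p.insert q.2 (some cur)) hnd.2 step
    have hins := pv_mu_insert (cols := cols) (rows := rows) (some cur) hq.1 hq.2
    simp only [List.foldl_cons, List.length_cons]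
    omega

-- ---------- candidate-list facts ----------
theorem pv_neighbors_nodup (c : Int × Int) : (pvNeighbors c).Nodup := by
  simp [pvNeighbors, List.nodup_cons, Prod.ext_iff]
  omega

theorem pv_raw_facts (goal : Int × Int) (blocked : List (Int × Int)) (cols rows : Int)
    (p : PySem.Dict (Int × Int) (Option (Int × Int))) (cur : Int × Int) :
    ((pvRawCand goal blocked cols rows p cur).map (·.2)).Nodup ∧
    ∀ q ∈ pvRawCand goal blocked cols rows p cur,
      q.2 ∈ pvCells cols rows ∧ p.contains q.2 = false := by
  constructor
  · have h1 : ((pvRawCand goal blocked cols rows p cur).map (·.2))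
        = (pvNeighbors cur).filter
            (fun n => pvInBounds n cols rows && !(blocked.contains n) && !(p.contains n)) := by
      simp [pvRawCand, Function.comp_def]
    rw [h1]
    exact (pv_neighbors_nodup cur).filter _
  · intro q hq
    rcases List.mem_map.mp hq with ⟨n, hn, rfl⟩
    have := List.of_mem_filter hn
    simp only [Bool.and_eq_true, Bool.not_eq_true'] at this
    exact ⟨pv_mem_cells.mpr this.1.1, this.2⟩

theorem pv_perm_facts {goal : Int × Int} {blocked : List (Int × Int)} {cols rows : Int}
    {p : PySem.Dict (Int × Int) (Option (Int × Int))} {cur : Int × Int}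
    {l : List (Int × (Int × Int))}
    (hl : l.Perm (pvRawCand goal blocked cols rows p cur)) :
    (l.map (·.2)).Nodup ∧
    ∀ q ∈ l, q.2 ∈ pvCells cols rows ∧ p.contains q.2 = false := by
  have h := pv_raw_facts goal blocked cols rows p cur
  exact ⟨((hl.map (·.2)).nodup_iff).mpr h.1, fun q hq => h.2 q (hl.mem_iff.mp hq)⟩

-- ---------- the marking fold, pointwise ----------
theorem pv_get?_fold (cur : Int × Int) :
    ∀ (l : List (Int × (Int × Int))) (p : PySem.Dict (Int × Int) (Option (Int × Int))),
    (l.map (·.2)).Nodup → (∀ q ∈ l, p.contains q.2 = false) →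
    ∀ k, (l.foldl (fun d q => d.insert q.2 (some cur)) p).get? k
      = if k ∈ l.map (·.2) then some (some cur) else p.get? k := by
  intro l
  induction l with
  | nil => intro p _ _ k; simp
  | cons q qs ih =>
    intro p hnd hall k
    simp only [List.map_cons, List.nodup_cons] at hnd
    have step : ∀ q' ∈ qs, (p.insert q.2 (some cur)).contains q'.2 = false := by
      intro q' hq'
      rw [PySem.Dict.contains_insert]
      have hne : q'.2 ≠ q.2 := fun he => hnd.1 (he ▸ List.mem_map_of_mem hq')
      simp [hne, hall q' (by simp [hq'])]
    simp only [List.foldl_cons]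
    rw [ih (p.insert q.2 (some cur)) hnd.2 step k]
    by_cases hk : k ∈ qs.map (·.2)
    · simp [hk]
    · simp only [hk, if_false, List.map_cons, List.mem_cons]
      rw [PySem.Dict.get?_insert]
      by_cases he : k = q.2 <;> simp [he]

theorem pv_get?_fold_frozen (cur : Int × Int) {l : List (Int × (Int × Int))}
    {p : PySem.Dict (Int × Int) (Option (Int × Int))} {k : Int × Int}
    (hnd : (l.map (·.2)).Nodup) (hfresh : ∀ q ∈ l, p.contains q.2 = false)
    (hk : p.contains k = true) :
    (l.foldl (fun d q => d.insert q.2 (some cur)) p).get? k = p.get? k := by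
  rw [pv_get?_fold cur l p hnd hfresh k, if_neg]
  intro hmem
  rcases List.mem_map.mp hmem with ⟨q, hq, rfl⟩
  simp [hfresh q hq] at hk

theorem pv_contains_fold (cur : Int × Int) {l : List (Int × (Int × Int))}
    {p : PySem.Dict (Int × Int) (Option (Int × Int))} (k : Int × Int)
    (hnd : (l.map (·.2)).Nodup) (hfresh : ∀ q ∈ l, p.contains q.2 = false) :
    ((l.foldl (fun d q => d.insert q.2 (some cur)) p).contains k = true)
      ↔ (k ∈ l.map (·.2) ∨ p.contains k = true) := by
  rw [PySem.Dict.contains_eq_isSome_get?, pv_get?_fold cur l p hnd hfresh k]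
  by_cases hk : k ∈ l.map (·.2) <;>
    simp [hk, PySem.Dict.contains_eq_isSome_get?]

-- ---------- the parent chain along the current path ----------
def pvChain (p : PySem.Dict (Int × Int) (Option (Int × Int))) :
    List (Int × Int) → (Int × Int) → Prop
  | [], g => p.get? g = some none
  | v :: rest, g => p.get? g = some (some v) ∧ pvChain p rest v

def pvChainTo (p : PySem.Dict (Int × Int) (Option (Int × Int))) :
    List (Int × Int) → Prop
  | [] => True
  | v :: rest => pvChain p rest v

-- frames[j] holds children of the j-th path element (both counted from the top)
def pvFramesOk (p : PySem.Dict (Int × Int) (Option (Int × Int))) :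
    List (List (Int × Int)) → List (Int × Int) → Prop
  | [], [] => True
  | [], _ :: _ => False
  | _ :: _, [] => False
  | fr :: rest, v :: rp' =>
    (∀ n ∈ fr, p.get? n = some (some v)) ∧ pvFramesOk p rest rp'

theorem pv_chainTo_tail {p : PySem.Dict (Int × Int) (Option (Int × Int))}
    {rp : List (Int × Int)} {v : Int × Int} (h : pvChain p rp v) : pvChainTo p rp := by
  cases rp with
  | nil => trivial
  | cons w rest => exact h.2

theorem pv_chain_frozen (cur : Int × Int) {l : List (Int × (Int × Int))}
    {p : PySem.Dict (Int × Int) (Option (Int × Int))}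
    (hnd : (l.map (·.2)).Nodup) (hfresh : ∀ q ∈ l, p.contains q.2 = false) :
    ∀ (rp : List (Int × Int)) (g : Int × Int), pvChain p rp g →
    p.contains g = true → (∀ m ∈ rp, p.contains m = true) →
    pvChain (l.foldl (fun d q => d.insert q.2 (some cur)) p) rp g := by
  intro rp
  induction rp with
  | nil =>
    intro g hch hg _
    show (l.foldl (fun d q => d.insert q.2 (some cur)) p).get? g = some none
    rw [pv_get?_fold_frozen cur hnd hfresh hg]
    exact hch
  | cons v rest ih =>
    intro g hch hg hall
    exact ⟨by rw [pv_get?_fold_frozen cur hnd hfresh hg]; exact hch.1,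
      ih v hch.2 (hall v (by simp)) (fun m hm => hall m (by simp [hm]))⟩

theorem pv_framesOk_frozen (cur : Int × Int) {l : List (Int × (Int × Int))}
    {p : PySem.Dict (Int × Int) (Option (Int × Int))}
    (hnd : (l.map (·.2)).Nodup) (hfresh : ∀ q ∈ l, p.contains q.2 = false) :
    ∀ (frames : List (List (Int × Int))) (rp : List (Int × Int)),
    pvFramesOk p frames rp → (∀ m ∈ frames.flatten, p.contains m = true) →
    pvFramesOk (l.foldl (fun d q => d.insert q.2 (some cur)) p) frames rp := by
  intro frames
  induction frames with
  | nil => intro rp h _; cases rp with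
    | nil => trivial
    | cons _ _ => exact absurd h (by simp [pvFramesOk])
  | cons fr rest ih =>
    intro rp h hall
    cases rp with
    | nil => exact absurd h (by simp [pvFramesOk])
    | cons v rp' =>
      refine ⟨fun n hn => ?_, ih rp' h.2 (fun m hm => hall m (by simp [hm]))⟩
      rw [pv_get?_fold_frozen cur hnd hfresh (hall n (by simp [hn]))]
      exact h.1 n hn

-- ---------- reconstruct computes the explicit path ----------
theorem pv_chain_recon (p : PySem.Dict (Int × Int) (Option (Int × Int))) :
    ∀ (rp : List (Int × Int)) (g : Int × Int) (acc : List (Int × Int)) (f : Nat),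
    pvChain p rp g → rp.length + 2 ≤ f →
    pvReconGo p f (some g) acc = ((acc ++ [g]) ++ rp).reverse := by
  intro rp
  induction rp with
  | nil =>
    intro g acc f hch hf
    obtain ⟨f1, rfl⟩ : ∃ f1, f = f1 + 2 := ⟨f - 2, by omega⟩
    show pvReconGo p (f1 + 1) ((p.get? g).getD none) (acc ++ [g]) = _
    rw [hch]
    simp [pvReconGo]
  | cons v rest ih =>
    intro g acc f hch hf
    obtain ⟨f1, rfl⟩ : ∃ f1, f = f1 + 1 := ⟨f - 1, by omega⟩
    show pvReconGo p f1 ((p.get? g).getD none) (acc ++ [g]) = _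
    rw [hch.1]
    show pvReconGo p f1 (some v) (acc ++ [g]) = _
    rw [ih v (acc ++ [g]) f1 hch.2 (by simp at hf ⊢; omega)]
    simp

theorem pv_recon_eq_path (p : PySem.Dict (Int × Int) (Option (Int × Int)))
    (goal : Int × Int) (rp : List (Int × Int)) (hch : pvChain p rp goal)
    (hlen : rp.length + 1 ≤ p.size) :
    pvReconstruct p goal = rp.reverse ++ [goal] := by
  unfold pvReconstruct
  rw [pv_chain_recon p rp goal [] (p.size + 1) hch (by omega)]
  simp

-- ---------- small set and size facts ----------
theorem pv_mem_update {s : PySem.Set (Int × Int)} {l : List (Int × Int)} {k : Int × Int} :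
    k ∈ PySem.Set.update s l ↔ k ∈ s ∨ k ∈ l := by
  induction l generalizing s with
  | nil => simp [PySem.Set.update]
  | cons x xs ih =>
    show k ∈ PySem.Set.update (s.add x) xs ↔ _
    rw [ih]
    simp [PySem.Set.mem_add]
    tauto

theorem pv_set_contains_iff (s : PySem.Set (Int × Int)) (k : Int × Int) :
    PySem.Set.contains s k = true ↔ k ∈ s := by
  simp [PySem.Set.contains]

theorem pv_len_le_size {p : PySem.Dict (Int × Int) (Option (Int × Int))}
    {l : List (Int × Int)} (hnd : l.Nodup) (hsub : ∀ m ∈ l, p.contains m = true) :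
    l.length ≤ p.size := by
  have h1 : l.toFinset.card = l.length := List.toFinset_card_of_nodup hnd
  have h2 : l.toFinset ⊆ p.keys.toFinset := by
    intro m hm
    rw [List.mem_toFinset] at hm ⊢
    exact (PySem.Dict.contains_iff_mem_keys p m).mp (hsub m hm)
  have h3 := Finset.card_le_card h2
  have h4 := List.toFinset_card_le p.keys
  have h5 : p.keys.length = p.size := by
    simp [PySem.Dict.keys, PySem.Dict.size]
  omega

-- Source B's children list is exactly the pop order of Source A's freshly pushed candidates
theorem pv_children_eq {goal : Int × Int} {blocked : List (Int × Int)} {cols rows : Int}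
    {vis : PySem.Set (Int × Int)} {pA : PySem.Dict (Int × Int) (Option (Int × Int))}
    (cur : Int × Int) (C1 : ∀ k, PySem.Set.contains vis k = pA.contains k) :
    (pvChildren goal blocked cols rows vis cur).1
      = (pvSortAsc (pvRawCand goal blocked cols rows pA cur)).map (·.2) := by
  unfold pvChildren pvRawCand
  dsimp only
  rw [List.filter_congr (fun n _ => by rw [C1 n] :
    ∀ n ∈ pvNeighbors cur,
      (pvInBounds n cols rows && !(blocked.contains n) && !(PySem.Set.contains vis n))
        = (pvInBounds n cols rows && !(blocked.contains n) && !(pA.contains n)))]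
  exact pv_sortNodes_eq goal _

-- ---------- A's loop: one expanded step, and fuel irrelevance ----------
theorem pv_fold_cons :
    ∀ (l : List (Int × (Int × Int))) (rest : List (Int × Int)),
    (l.foldl (fun (s : List (Int × Int)) q => q.2 :: s) rest)
      = (l.map (·.2)).reverse ++ rest := by
  intro l
  induction l with
  | nil => intro rest; simp
  | cons q qs ih => intro rest; simp [ih]

theorem pv_loopA_nil (goal : Int × Int) (blocked : List (Int × Int)) (cols rows : Int)
    (f : Nat) (p : PySem.Dict (Int × Int) (Option (Int × Int))) :
    pvLoopA goal blocked cols rows f [] p = [] := by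
  cases f <;> rfl

theorem pv_loopA_step (goal : Int × Int) (blocked : List (Int × Int)) (cols rows : Int)
    (fa : Nat) (cur : Int × Int) (rest : List (Int × Int))
    (p : PySem.Dict (Int × Int) (Option (Int × Int))) (hg : cur ≠ goal) :
    pvLoopA goal blocked cols rows (fa + 1) (cur :: rest) p =
      pvLoopA goal blocked cols rows fa
        ((pvSortAsc (pvRawCand goal blocked cols rows p cur)).map (·.2) ++ rest)
        ((pvSortDesc (pvRawCand goal blocked cols rows p cur)).foldl
          (fun d q => d.insert q.2 (some cur)) p) := by
  simp only [pvLoopA, if_neg hg]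
  rw [PySem.List.foldl_prod_mk
        (fun (dd : PySem.Dict (Int × Int) (Option (Int × Int)))
          (q' : Int × (Int × Int)) => dd.insert q'.2 (some cur))
        (fun (st : List (Int × Int)) (q' : Int × (Int × Int)) => q'.2 :: st),
      pv_fold_cons]
  rw [pv_sortAsc_eq_reverse, List.map_reverse]

-- ---------- THE SIMULATION: A's stack loop equals B's backtracking machine ----------
theorem pv_sim (goal : Int × Int) (blocked : List (Int × Int)) (cols rows : Int) :
    ∀ (fB : Nat) (frames : List (List (Int × Int))) (rp : List (Int × Int))
      (pA : PySem.Dict (Int × Int) (Option (Int × Int))) (vis : PySem.Set (Int × Int))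
      (fA : Nat),
    (∀ k, PySem.Set.contains vis k = pA.contains k) →
    pvFramesOk pA frames rp →
    pvChainTo pA rp →
    (∀ m, (rp ++ frames.flatten).count m ≤ 1) →
    (∀ m ∈ rp ++ frames.flatten, pA.contains m = true) →
    frames.flatten.length + pvMu cols rows pA + 1 ≤ fA →
    2 * frames.flatten.length + frames.length + 3 * pvMu cols rows pA + 1 ≤ fB →
    pvLoopA goal blocked cols rows fA frames.flatten pA
      = pvLoopB goal blocked cols rows fB frames rp.reverse vis := by
  intro fB
  induction fB with
  | zero => intro frames rp pA vis fA _ _ _ _ _ _ h7; omega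
  | succ fb ih =>
    intro frames rp pA vis fA C1 HF HC HN HS hfA hfB
    rcases frames with _ | ⟨fr, rest⟩
    · -- no pending lists left: both loops return []
      simp only [List.flatten_nil]
      rw [pv_loopA_nil]
      rfl
    rcases fr with _ | ⟨n, todo⟩
    · -- top pending list exhausted: backtrack
      rcases rp with _ | ⟨v, rp'⟩
      · exact absurd HF (by simp [pvFramesOk])
      have hstep : pvLoopB goal blocked cols rows (fb + 1) ([] :: rest)
          (v :: rp').reverse vis
          = pvLoopB goal blocked cols rows fb rest ((v :: rp').reverse).dropLast vis := rfl
      rw [hstep, List.reverse_cons, List.dropLast_concat]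
      simp only [List.flatten_cons, List.nil_append] at *
      exact ih rest rp' pA vis fA C1 HF.2 (pv_chainTo_tail HC)
        (fun m => by have := HN m; simp only [List.count_append, List.count_cons] at this ⊢; omega)
        (fun m hm => HS m (by simp only [List.mem_append, List.mem_cons] at hm ⊢; tauto))
        hfA (by simp only [List.length_cons] at hfB ⊢; omega)
    rcases rp with _ | ⟨v, rp'⟩
    · exact absurd HF (by simp [pvFramesOk])
    -- a pending node n is taken
    have hflat : ((n :: todo) :: rest).flatten = n :: (todo ++ rest.flatten) := by simp
    obtain ⟨fa, rfl⟩ : ∃ fa, fA = fa + 1 := ⟨fA - 1, by omega⟩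
    by_cases hg : n = goal
    · -- n is the goal: A reconstructs, B returns the explicit path
      have hB : pvLoopB goal blocked cols rows (fb + 1) ((n :: todo) :: rest)
          (v :: rp').reverse vis = (v :: rp').reverse ++ [n] := by
        simp [pvLoopB, hg]
      rw [hB, hflat]
      have hA : pvLoopA goal blocked cols rows (fa + 1) (n :: (todo ++ rest.flatten)) pA
          = pvReconstruct pA goal := by
        simp [pvLoopA, hg]
      rw [hA, ← hg]
      have hchain : pvChain pA (v :: rp') n := ⟨HF.1 n (by simp), HC⟩
      have hmemn : n ∈ ((n :: todo) :: rest).flatten := by simp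
      have hnd : ((v :: rp') ++ [n]).Nodup := by
        rw [List.nodup_iff_count_le_one]
        intro a
        have h0 := HN a
        rw [List.count_append] at h0 ⊢
        have h2 : [n].count a ≤ (((n :: todo) :: rest).flatten).count a := by
          by_cases ha : a = n
          · rw [ha]
            have hx : 0 < (((n :: todo) :: rest).flatten).count n :=
              List.count_pos_iff.mpr hmemn
            have hy : [n].count n = 1 := by simp
            omega
          · have hy : [n].count a = 0 := List.count_eq_zero.mpr (by simp [ha])
            omega
        omega
      have hsub : ∀ m ∈ (v :: rp') ++ [n], pA.contains m = true := by
        intro m hm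
        rcases List.mem_append.mp hm with hm | hm
        · exact HS m (List.mem_append.mpr (Or.inl hm))
        · rw [List.mem_singleton.mp hm]
          exact HS n (List.mem_append.mpr (Or.inr hmemn))
      have hsize := pv_len_le_size hnd hsub
      simp only [List.length_append, List.length_cons] at hsize
      rw [pv_recon_eq_path pA n (v :: rp') hchain (by simpa using hsize)]
    · -- n is expanded on both sides
      have hBstep : pvLoopB goal blocked cols rows (fb + 1) ((n :: todo) :: rest)
          (v :: rp').reverse vis
          = pvLoopB goal blocked cols rows fb
              ((pvChildren goal blocked cols rows vis n).1 :: todo :: rest)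
              ((v :: rp').reverse ++ [n])
              (pvChildren goal blocked cols rows vis n).2 := by
        simp [pvLoopB, hg]
      have hc2 : (pvChildren goal blocked cols rows vis n).2
          = PySem.Set.update vis (pvChildren goal blocked cols rows vis n).1 := rfl
      rw [hBstep, hc2, pv_children_eq n C1, hflat,
        pv_loopA_step goal blocked cols rows fa n (todo ++ rest.flatten) pA hg]
      set raw := pvRawCand goal blocked cols rows pA n with hraw
      set nbs := (pvSortAsc raw).map (·.2) with hnbs
      have hfD := pv_perm_facts (pv_sortDesc_perm raw)
      have hfD2 : ∀ q ∈ pvSortDesc raw, pA.contains q.2 = false :=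
        fun q hq => (hfD.2 q hq).2
      have hfAsc := pv_perm_facts (pv_sortAsc_perm raw)
      have hndnbs : nbs.Nodup := hfAsc.1
      have hfreshnbs : ∀ m ∈ nbs, pA.contains m = false := by
        intro m hm
        rcases List.mem_map.mp hm with ⟨q, hq, rfl⟩
        exact (hfAsc.2 q hq).2
      have hmemnbs : ∀ m, m ∈ nbs ↔ m ∈ (pvSortDesc raw).map (·.2) := by
        intro m
        exact (((pv_sortAsc_perm raw).trans (pv_sortDesc_perm raw).symm).map (·.2)).mem_iff
      have hlen_eq : nbs.length = (pvSortDesc raw).length := by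
        rw [hnbs, List.length_map,
          (pv_sortAsc_perm raw).length_eq, (pv_sortDesc_perm raw).length_eq]
      set pA1 := (pvSortDesc raw).foldl (fun d q => d.insert q.2 (some n)) pA with hpA1
      have hmu := pv_mu_fold (cols := cols) (rows := rows) n (pvSortDesc raw) pA
        hfD.1 hfD.2
      rw [← hpA1] at hmu
      have hcf : ∀ m, (pA1.contains m = true)
          ↔ (m ∈ (pvSortDesc raw).map (·.2) ∨ pA.contains m = true) :=
        fun m => pv_contains_fold n m hfD.1 hfD2
      have C1' : ∀ k, PySem.Set.contains (PySem.Set.update vis nbs) k = pA1.contains k := by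
        intro k
        rw [Bool.eq_iff_iff, pv_set_contains_iff, pv_mem_update, hcf k, ← hmemnbs k,
          ← pv_set_contains_iff, C1 k]
        tauto
      have HF' : pvFramesOk pA1 (nbs :: todo :: rest) (n :: v :: rp') := by
        refine ⟨fun m hm => ?_, ?_⟩
        · rw [hpA1, pv_get?_fold n _ pA hfD.1 hfD2 m, if_pos ((hmemnbs m).mp hm)]
        · exact pv_framesOk_frozen n hfD.1 hfD2 (todo :: rest) (v :: rp')
            ⟨fun m hm => HF.1 m (List.mem_cons_of_mem n hm), HF.2⟩
            (fun m hm => HS m (by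
              simp only [List.mem_append, List.flatten_cons, List.mem_cons] at hm ⊢
              tauto))
      have HC' : pvChainTo pA1 (n :: v :: rp') := by
        show pvChain pA1 (v :: rp') n
        exact pv_chain_frozen n hfD.1 hfD2 (v :: rp') n ⟨HF.1 n (by simp), HC⟩
          (HS n (by simp))
          (fun m hm => HS m (by simp only [List.mem_append]; exact Or.inl hm))
      have hsplit : ((n :: v :: rp') ++ ((nbs :: todo :: rest).flatten))
          = [n] ++ ((v :: rp') ++ (nbs ++ (todo ++ rest.flatten))) := by simp
      have hsplit0 : ((v :: rp') ++ (((n :: todo) :: rest).flatten))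
          = (v :: rp') ++ ([n] ++ (todo ++ rest.flatten)) := by simp
      have HN' : ∀ m, ((n :: v :: rp') ++ ((nbs :: todo :: rest).flatten)).count m ≤ 1 := by
        intro m
        have h0 := HN m
        rw [hsplit0] at h0
        rw [hsplit]
        have hnbsle : nbs.count m ≤ 1 := List.nodup_iff_count_le_one.mp hndnbs m
        by_cases hm : m ∈ nbs
        · have h2 : m ∉ (v :: rp') ++ (((n :: todo) :: rest).flatten) := by
            intro hc
            have := HS m hc
            rw [hfreshnbs m hm] at this
            exact absurd this (by simp)
          rw [hsplit0] at h2
          have h3 : ((v :: rp') ++ ([n] ++ (todo ++ rest.flatten))).count m = 0 :=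
            List.count_eq_zero.mpr h2
          simp only [List.count_append] at h3 ⊢
          omega
        · have h4 : nbs.count m = 0 := List.count_eq_zero.mpr hm
          simp only [List.count_append] at h0 ⊢
          omega
      have HS' : ∀ m ∈ (n :: v :: rp') ++ ((nbs :: todo :: rest).flatten),
          pA1.contains m = true := by
        intro m hm
        rw [hsplit] at hm
        by_cases hmn : m ∈ nbs
        · exact (hcf m).mpr (Or.inl ((hmemnbs m).mp hmn))
        · refine (hcf m).mpr (Or.inr (HS m ?_))
          rw [hsplit0]
          simp only [List.mem_append, List.mem_cons] at hm ⊢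
          tauto
      have hflatlen : ((nbs :: todo :: rest).flatten).length
          = nbs.length + (todo.length + rest.flatten.length) := by
        simp [List.flatten_cons, List.length_append]
      have hfA' : ((nbs :: todo :: rest).flatten).length + pvMu cols rows pA1 + 1 ≤ fa := by
        rw [hflatlen]
        rw [hflat] at hfA
        simp only [List.length_cons, List.length_append] at hfA
        omega
      have hfB' : 2 * ((nbs :: todo :: rest).flatten).length + (nbs :: todo :: rest).length
          + 3 * pvMu cols rows pA1 + 1 ≤ fb := by
        rw [hflatlen]
        rw [hflat] at hfB
        simp only [List.length_cons, List.length_append] at hfB ⊢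
        omega
      have hgoal := ih (nbs :: todo :: rest) (n :: v :: rp') pA1
        (PySem.Set.update vis nbs) fa C1' HF' HC' HN' HS' hfA' hfB'
      rw [List.reverse_cons] at hgoal
      simp only [List.flatten_cons] at hgoal
      exact hgoal

-- p0 = {start: None}, the dict both in dfs's first expansion and in the start == goal case
theorem pv_p0_get?_self (start : Int × Int) :
    (PySem.Dict.ofList [(start, (none : Option (Int × Int)))]).get? start = some none := by
  simp [PySem.Dict.ofList, PySem.Dict.update, PySem.Dict.get?_insert_self]

theorem pv_p0_size (start : Int × Int) :
    (PySem.Dict.ofList [(start, (none : Option (Int × Int)))]).size = 1 := by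
  simp [PySem.Dict.ofList, PySem.Dict.update, PySem.Dict.size_insert]

theorem pv_p0_contains (start k : Int × Int) :
    ((PySem.Dict.ofList [(start, (none : Option (Int × Int)))]).contains k = true)
      ↔ k = start := by
  simp [PySem.Dict.ofList, PySem.Dict.update, PySem.Dict.contains_insert]

theorem pv_vis0_c1 (start k : Int × Int) :
    PySem.Set.contains (PySem.Set.ofList [start]) k
      = (PySem.Dict.ofList [(start, (none : Option (Int × Int)))]).contains k := by
  rw [Bool.eq_iff_iff, pv_set_contains_iff, pv_p0_contains]
  have : PySem.Set.ofList [start] = [start] := rfl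
  rw [this, List.mem_singleton]

-- ===== VERDICT (by name: the statement is the Claim_ definition above) =====
theorem dfs_spec : Claim_equal_dfs := by
  intro start goal blocked cols rows _
  unfold Spec_dfs dfs dfs_alt
  set p0 := PySem.Dict.ofList [(start, (none : Option (Int × Int)))] with hp0
  by_cases hs : start = goal
  · -- start == goal: A pops start and reconstructs {start: None}; B returns [start]
    rw [if_pos hs]
    rw [show pvFuel cols rows = (cols.toNat * rows.toNat + 1) + 1 from rfl]
    have hA : pvLoopA goal blocked cols rows (cols.toNat * rows.toNat + 1 + 1) [start] p0
        = pvReconstruct p0 goal := by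
      simp [pvLoopA, hs]
    rw [hA]
    have hch : pvChain p0 [] goal := by
      show p0.get? goal = some none
      rw [← hs, hp0]
      exact pv_p0_get?_self start
    rw [pv_recon_eq_path p0 goal [] hch (by rw [hp0, pv_p0_size]; simp)]
    simp [hs]
  · -- start ≠ goal: A's first iteration expands start; then the simulation applies
    rw [if_neg hs]
    show _ = pvLoopB goal blocked cols rows (pvFuelB cols rows)
      [(pvChildren goal blocked cols rows (PySem.Set.ofList [start]) start).1] [start]
      (pvChildren goal blocked cols rows (PySem.Set.ofList [start]) start).2
    have hC1 : ∀ k, PySem.Set.contains (PySem.Set.ofList [start]) k = p0.contains k :=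
      fun k => pv_vis0_c1 start k
    have hc2 : (pvChildren goal blocked cols rows (PySem.Set.ofList [start]) start).2
        = PySem.Set.update (PySem.Set.ofList [start])
            (pvChildren goal blocked cols rows (PySem.Set.ofList [start]) start).1 := rfl
    rw [hc2, pv_children_eq start hC1]
    rw [show pvFuel cols rows = (cols.toNat * rows.toNat + 1) + 1 from rfl,
      show [start] = start :: ([] : List (Int × Int)) from rfl,
      pv_loopA_step goal blocked cols rows (cols.toNat * rows.toNat + 1) start [] p0 hs]
    set raw := pvRawCand goal blocked cols rows p0 start with hraw
    set nbs := (pvSortAsc raw).map (·.2) with hnbs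
    have hfD := pv_perm_facts (pv_sortDesc_perm raw)
    have hfD2 : ∀ q ∈ pvSortDesc raw, p0.contains q.2 = false :=
      fun q hq => (hfD.2 q hq).2
    have hfAsc := pv_perm_facts (pv_sortAsc_perm raw)
    have hndnbs : nbs.Nodup := hfAsc.1
    have hfreshnbs : ∀ m ∈ nbs, p0.contains m = false := by
      intro m hm
      rcases List.mem_map.mp hm with ⟨q, hq, rfl⟩
      exact (hfAsc.2 q hq).2
    have hmemnbs : ∀ m, m ∈ nbs ↔ m ∈ (pvSortDesc raw).map (·.2) := by
      intro m
      exact (((pv_sortAsc_perm raw).trans (pv_sortDesc_perm raw).symm).map (·.2)).mem_iff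
    have hlen_eq : nbs.length = (pvSortDesc raw).length := by
      rw [hnbs, List.length_map,
        (pv_sortAsc_perm raw).length_eq, (pv_sortDesc_perm raw).length_eq]
    set pA1 := (pvSortDesc raw).foldl (fun d q => d.insert q.2 (some start)) p0 with hpA1
    have hmu := pv_mu_fold (cols := cols) (rows := rows) start (pvSortDesc raw) p0
      hfD.1 hfD.2
    rw [← hpA1] at hmu
    have hmu0 := pv_mu_le cols rows p0
    have hcf : ∀ m, (pA1.contains m = true)
        ↔ (m ∈ (pvSortDesc raw).map (·.2) ∨ p0.contains m = true) :=
      fun m => pv_contains_fold start m hfD.1 hfD2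
    have hstart1 : p0.contains start = true := (pv_p0_contains start start).mpr rfl
    have C1' : ∀ k, PySem.Set.contains
        (PySem.Set.update (PySem.Set.ofList [start]) nbs) k = pA1.contains k := by
      intro k
      rw [Bool.eq_iff_iff, pv_set_contains_iff, pv_mem_update, hcf k, ← hmemnbs k,
        ← pv_set_contains_iff, hC1 k]
      tauto
    have HF' : pvFramesOk pA1 [nbs] [start] := by
      refine ⟨fun m hm => ?_, trivial⟩
      rw [hpA1, pv_get?_fold start _ p0 hfD.1 hfD2 m, if_pos ((hmemnbs m).mp hm)]
    have HC' : pvChainTo pA1 [start] := by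
      show pA1.get? start = some none
      rw [hpA1, pv_get?_fold_frozen start hfD.1 hfD2 hstart1]
      exact pv_p0_get?_self start
    have HN' : ∀ m, ([start] ++ [nbs].flatten).count m ≤ 1 := by
      intro m
      simp only [List.flatten_cons, List.flatten_nil, List.append_nil, List.count_append]
      by_cases hm : m = start
      · have h1 : nbs.count m = 0 := by
          apply List.count_eq_zero.mpr
          intro hc
          rw [hm] at hc
          rw [hfreshnbs start hc] at hstart1
          exact absurd hstart1 (by simp)
        have h2 : [start].count m ≤ 1 := by rw [hm]; simp
        omega
      · have h1 : [start].count m = 0 := List.count_eq_zero.mpr (by simp [hm])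
        have h2 : nbs.count m ≤ 1 := List.nodup_iff_count_le_one.mp hndnbs m
        omega
    have HS' : ∀ m ∈ [start] ++ [nbs].flatten, pA1.contains m = true := by
      intro m hm
      simp only [List.flatten_cons, List.flatten_nil, List.append_nil, List.mem_append,
        List.mem_singleton] at hm
      rcases hm with hm | hm
      · exact (hcf m).mpr (Or.inr (by rw [hm]; exact hstart1))
      · exact (hcf m).mpr (Or.inl ((hmemnbs m).mp hm))
    have hfA' : [nbs].flatten.length + pvMu cols rows pA1 + 1
        ≤ cols.toNat * rows.toNat + 1 := by
      simp only [List.flatten_cons, List.flatten_nil, List.append_nil]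
      omega
    have hfB' : 2 * [nbs].flatten.length + [nbs].length + 3 * pvMu cols rows pA1 + 1
        ≤ pvFuelB cols rows := by
      simp only [List.flatten_cons, List.flatten_nil, List.append_nil, List.length_cons,
        List.length_nil, pvFuelB]
      omega
    have hsim := pv_sim goal blocked cols rows (pvFuelB cols rows) [nbs] [start] pA1
      (PySem.Set.update (PySem.Set.ofList [start]) nbs)
      (cols.toNat * rows.toNat + 1) C1' HF' HC' HN' HS' hfA' hfB'
    simp only [List.flatten_cons, List.flatten_nil, List.append_nil,
      List.reverse_cons, List.reverse_nil, List.nil_append] at hsim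
    simpa using hsim
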